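-- pv_equiv track=rewrite | github.com/Sihui-L/advent-of-code | task/topic_insights_2025.py | find_duplicate_topics
-- ===== SOURCE A (Python) =====
-- from collections import Counter, defaultdict
--
-- def find_duplicate_topics(topics: list[str]) -> list[tuple[str, int]]:
--     counts = Counter()
--     for topic in topics:
--         key = topic.strip().lower()
--         if not key:
--             continue
--         counts[key] += 1
--     duplicates = [(topic, count) for topic, count in counts.items() if count > 1]
--     duplicates.sort(key=lambda item: item[1], reverse=True)
--     return duplicates
-- ===== SOURCE B (Python) =====
-- def find_duplicate_topics(topics: list[str]) -> list[tuple[str, int]]: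
--     counts = {}
--     for topic in topics:
--         key = topic.strip().lower()
--         if not key:
--             continue
--         counts[key] = counts.get(key, 0) + 1
--     buckets = {}
--     max_c = 0
--     for item in counts.items():
--         if item[1] > 1:
--             buckets.setdefault(item[1], []).append(item)
--             if item[1] > max_c:
--                 max_c = item[1]
--     result = []
--     for c in range(max_c, 1, -1):
--         result.extend(buckets.get(c, []))
--     return result
-- ===== Notes on version B (the rewrite author's own statement) =====
-- stated objective: alternative
-- what changed: Replaces the comparison sort of the duplicates by a counting/bucket pass: keys are appended to per-count buckets in dict insertion order and the output is rebuilt by scanning counts from the maximum down to 2, reproducing the stable descending order without sorting.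
import Mathlib
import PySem

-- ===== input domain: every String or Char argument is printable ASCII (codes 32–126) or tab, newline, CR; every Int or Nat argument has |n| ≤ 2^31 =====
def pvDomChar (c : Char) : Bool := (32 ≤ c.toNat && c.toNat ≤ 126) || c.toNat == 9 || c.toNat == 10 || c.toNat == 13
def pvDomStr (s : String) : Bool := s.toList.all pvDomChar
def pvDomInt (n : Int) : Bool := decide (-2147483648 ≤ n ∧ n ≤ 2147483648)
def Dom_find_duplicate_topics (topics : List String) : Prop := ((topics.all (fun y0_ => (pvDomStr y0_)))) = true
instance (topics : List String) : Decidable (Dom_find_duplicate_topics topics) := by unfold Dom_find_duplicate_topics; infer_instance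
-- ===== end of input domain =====

-- B replaces the stable descending sort of the duplicates by per-count buckets concatenated
-- from the maximum count down to 2 (alternative decomposition, same exact output).

-- ===== PORT A =====
def find_duplicate_topics (topics : List String) : List (String × Int) :=
  let counts : PySem.Dict String Int :=
    topics.foldl (fun counts topic =>
      let key := PySem.Str.lower (PySem.Str.strip topic)
      if key = "" then counts
      else counts.modify key 0 (· + 1)) PySem.Dict.empty
  let duplicates := counts.items.filter (fun item => decide (1 < item.2))
  PySem.List.sorted duplicates (fun item => item.2) true

-- ===== PORT B =====
def find_duplicate_topics_alt (topics : List String) : List (String × Int) :=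
  let counts : PySem.Dict String Int :=
    topics.foldl (fun counts topic =>
      let key := PySem.Str.lower (PySem.Str.strip topic)
      if key = "" then counts
      else counts.insert key (counts.getD key 0 + 1)) PySem.Dict.empty
  let st : PySem.Dict Int (List (String × Int)) × Int :=
    counts.items.foldl (fun st item =>
      if 1 < item.2 then
        (st.1.modify item.2 [] (fun l => l ++ [item]),
         if st.2 < item.2 then item.2 else st.2)
      else st) (PySem.Dict.empty, 0)
  (PySem.List.pyRange st.2 1 (-1)).foldl (fun result c => result ++ st.1.getD c []) []

-- ===== PRECONDITION & SPEC =====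
def Spec_find_duplicate_topics (topics : List String) (out : List (String × Int)) : Prop := out = find_duplicate_topics_alt topics
instance (topics : List String) (out : List (String × Int)) : Decidable (Spec_find_duplicate_topics topics out) := by unfold Spec_find_duplicate_topics; infer_instance

-- ===== CLAIM (what is proved, stated in full; the proofs are below) =====
def Claim_equal_find_duplicate_topics : Prop := ∀ (topics : List String), Dom_find_duplicate_topics topics → Spec_find_duplicate_topics topics (find_duplicate_topics topics)

-- ===== LEMMAS AND PROOFS =====

-- Unfolding step of insertBy on a cons cell.
theorem pvInsertByCons {α : Type} (before : α → α → Bool) (x f : α) (l : List α) :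
    PySem.List.insertBy before x (f :: l)
    = if before x f then x :: f :: l else f :: PySem.List.insertBy before x l := rfl

-- The pair-state fold of B splits into the bucket fold and the running-max fold, both over the filtered list.
theorem pvFoldSplit (l : List (String × Int)) (b0 : PySem.Dict Int (List (String × Int))) (m0 : Int) :
    l.foldl (fun st item =>
      if 1 < item.2 then
        (st.1.modify item.2 [] (fun l => l ++ [item]),
         if st.2 < item.2 then item.2 else st.2)
      else st) (b0, m0)
    = ((l.filter (fun item => decide (1 < item.2))).foldl
         (fun b item => b.modify item.2 [] (fun l => l ++ [item])) b0,
       (l.filter (fun item => decide (1 < item.2))).foldl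
         (fun m item => if m < item.2 then item.2 else m) m0) := by
  induction l generalizing b0 m0 with
  | nil => rfl
  | cons p l ih =>
    simp only [List.foldl_cons, List.filter_cons]
    by_cases hp : 1 < p.2
    · simp only [hp, decide_true, if_pos, List.foldl_cons]
      exact ih _ _
    · simp only [hp, decide_false]
      exact ih b0 m0

-- Content of a bucket: exactly the pairs with that count, in order.
theorem pvBucketGetD (dups : List (String × Int)) (d0 : PySem.Dict Int (List (String × Int))) (c : Int) :
    (dups.foldl (fun b item => b.modify item.2 [] (fun l => l ++ [item])) d0).getD c []
    = d0.getD c [] ++ dups.filter (fun p => decide (p.2 = c)) := by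
  induction dups generalizing d0 with
  | nil => simp
  | cons p l ih =>
    simp only [List.foldl_cons, List.filter_cons, ih]
    rw [PySem.Dict.getD_modify]
    by_cases hc : c = p.2
    · simp [hc]
    · have hc' : ¬ p.2 = c := fun h => hc h.symm
      simp [hc, hc']

-- The start of the running-max fold is a lower bound of its result.
theorem pvMaxMono (l : List (String × Int)) (m : Int) :
    m ≤ l.foldl (fun m item => if m < item.2 then item.2 else m) m := by
  induction l generalizing m with
  | nil => simp
  | cons q l ih =>
    simp only [List.foldl_cons]
    have h : m ≤ (if m < q.2 then q.2 else m) := by split <;> omega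
    exact h.trans (ih _)

-- The running max bounds every element of the list.
theorem pvMaxBound (dups : List (String × Int)) (m : Int) :
    ∀ p ∈ dups, p.2 ≤ dups.foldl (fun m item => if m < item.2 then item.2 else m) m := by
  induction dups generalizing m with
  | nil => simp
  | cons q l ih =>
    intro p hp
    simp only [List.foldl_cons]
    rcases List.mem_cons.mp hp with h | h
    · have h1 : p.2 ≤ (if m < q.2 then q.2 else m) := by rw [h]; split <;> omega
      exact h1.trans (pvMaxMono l _)
    · exact ih _ p h

-- range(n, 1, -1) in closed form.
theorem pvRangeDesc (n : Int) :
    PySem.List.pyRange n 1 (-1) = (List.range (n - 1).toNat).map (fun k : Nat => n - k) := by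
  unfold PySem.List.pyRange
  rw [if_neg (by norm_num)]
  rw [if_neg (by norm_num)]
  by_cases h : (1 : Int) < n
  · rw [if_pos h]
    have harg : ((n - 1 + -(-1) - 1) / -(-1)).toNat = (n - 1).toNat := by
      norm_num
    rw [harg]
    show List.map (fun k : Nat => n + -1 * (k : Int)) (List.range (n - 1).toNat) = _
    apply List.map_congr_left
    intro k _
    ring
  · rw [if_neg h]
    have : (n - 1).toNat = 0 := by omega
    simp [this]

-- Membership in the descending range.
theorem pvMemRangeDesc (n c : Int) :
    c ∈ (List.range (n - 1).toNat).map (fun k : Nat => n - k) ↔ 2 ≤ c ∧ c ≤ n := by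
  simp only [List.mem_map, List.mem_range]
  constructor
  · rintro ⟨k, hk, rfl⟩; omega
  · rintro ⟨h2, hn⟩
    exact ⟨(n - c).toNat, by omega, by omega⟩

-- The descending range is strictly decreasing.
theorem pvRangeDescPairwise (n : Int) :
    ((List.range (n - 1).toNat).map (fun k : Nat => n - k)).Pairwise (fun a b => b < a) := by
  rw [List.pairwise_map]
  exact (List.pairwise_lt_range).imp (by intro a b h; omega)

-- insertBy skips a prefix it does not go before.
theorem pvInsertBySkip {α : Type} (before : α → α → Bool) (x : α) (F R : List α)
    (hF : ∀ f ∈ F, before x f = false) :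
    PySem.List.insertBy before x (F ++ R) = F ++ PySem.List.insertBy before x R := by
  induction F with
  | nil => rfl
  | cons f F ih =>
    rw [List.cons_append, pvInsertByCons, hF f (by simp), if_neg (by simp),
        ih (fun g hg => hF g (by simp [hg])), List.cons_append]

-- insertBy goes right at the front when it goes before every element.
theorem pvInsertByFront {α : Type} (before : α → α → Bool) (x : α) (R : List α)
    (hR : ∀ y ∈ R, before x y = true) :
    PySem.List.insertBy before x R = x :: R := by
  cases R with
  | nil => rfl
  | cons y ys => rw [pvInsertByCons, hR y (by simp), if_pos rfl]

-- flatMap congruence on members.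
theorem pvFlatMapCongr {α β : Type} (l : List α) (f g : α → List β)
    (h : ∀ a ∈ l, f a = g a) : l.flatMap f = l.flatMap g := by
  induction l with
  | nil => rfl
  | cons a l ih => simp [List.flatMap_cons, h a (by simp), ih (fun b hb => h b (by simp [hb]))]

-- Inserting one element into the bucketed form appends it at the end of its bucket.
theorem pvInsertBucket (cs : List Int) (ps : List (String × Int)) (x : String × Int)
    (hcs : cs.Pairwise (fun a b => b < a)) (hx : x.2 ∈ cs) :
    PySem.List.insertBy (fun a b => decide (b.2 < a.2)) x
      (cs.flatMap (fun c => ps.filter (fun p => decide (p.2 = c))))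
    = cs.flatMap (fun c => (ps ++ [x]).filter (fun p => decide (p.2 = c))) := by
  induction cs with
  | nil => cases hx
  | cons c cs ih =>
    rcases List.pairwise_cons.mp hcs with ⟨hhead, htail⟩
    simp only [List.flatMap_cons]
    by_cases hxc : x.2 = c
    · -- x belongs to the head bucket: skip the bucket, insert in front of the rest
      rw [pvInsertBySkip _ x _ _ (by
        intro f hf
        have hfc : f.2 = c := of_decide_eq_true (List.mem_filter.mp hf).2
        simp [hfc, hxc])]
      rw [pvInsertByFront _ x _ (by
        intro y hy
        rcases List.mem_flatMap.mp hy with ⟨c', hc', hy'⟩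
        have h1 : y.2 = c' := of_decide_eq_true (List.mem_filter.mp hy').2
        have h2 : c' < c := hhead c' hc'
        rw [decide_eq_true_eq, h1, hxc]
        exact h2)]
      have hfilt : (ps ++ [x]).filter (fun p => decide (p.2 = c)) =
          ps.filter (fun p => decide (p.2 = c)) ++ [x] := by
        simp [List.filter_append, hxc]
      have hrest : cs.flatMap (fun c => (ps ++ [x]).filter (fun p => decide (p.2 = c))) =
          cs.flatMap (fun c => ps.filter (fun p => decide (p.2 = c))) := by
        apply pvFlatMapCongr
        intro a ha
        have hne : ¬ x.2 = a := by have := hhead a ha; omega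
        simp [List.filter_append, hne]
      rw [hfilt, hrest]
      simp
    · -- x belongs to a later bucket: skip the head bucket
      have hx' : x.2 ∈ cs := by
        rcases List.mem_cons.mp hx with h | h
        · exact absurd h hxc
        · exact h
      rw [pvInsertBySkip _ x _ _ (by
        intro f hf
        have h1 : f.2 = c := of_decide_eq_true (List.mem_filter.mp hf).2
        have h2 : x.2 < c := hhead _ hx'
        rw [decide_eq_false_iff_not, h1]
        omega)]
      rw [ih htail hx']
      congr 1
      simp [List.filter_append, hxc]

-- The stable descending sort equals the bucketed concatenation.
theorem pvSortBuckets (cs : List Int) (ps : List (String × Int))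
    (hcs : cs.Pairwise (fun a b => b < a)) (hps : ∀ p ∈ ps, p.2 ∈ cs) :
    PySem.List.sorted ps (fun p => p.2) true
    = cs.flatMap (fun c => ps.filter (fun p => decide (p.2 = c))) := by
  induction ps using List.reverseRecOn with
  | nil => simp [PySem.List.sorted]
  | append_singleton ps x ih =>
    rw [PySem.List.sorted_rev_eq_foldl_insertBy, List.foldl_append,
        ← PySem.List.sorted_rev_eq_foldl_insertBy]
    simp only [List.foldl_cons, List.foldl_nil]
    rw [ih (fun p hp => hps p (by simp [hp]))]
    exact pvInsertBucket cs ps x hcs (hps x (by simp))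

-- ===== VERDICT (by name: the statement is the Claim_ definition above) =====
-- Main lemma: for any counts dict, the sorted duplicates equal the bucketed concatenation.
theorem pvMain (counts : PySem.Dict String Int) :
    PySem.List.sorted (counts.items.filter (fun item => decide (1 < item.2)))
      (fun item => item.2) true
    = (PySem.List.pyRange
        (counts.items.foldl (fun st item =>
          if 1 < item.2 then
            (st.1.modify item.2 [] (fun l => l ++ [item]),
             if st.2 < item.2 then item.2 else st.2)
          else st) (PySem.Dict.empty, 0)).2 1 (-1)).foldl
        (fun result c => result ++
          (counts.items.foldl (fun st item =>
            if 1 < item.2 then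
              (st.1.modify item.2 [] (fun l => l ++ [item]),
               if st.2 < item.2 then item.2 else st.2)
            else st) (PySem.Dict.empty, 0)).1.getD c []) [] := by
  rw [pvFoldSplit]
  set dups := counts.items.filter (fun item => decide (1 < item.2)) with hdups
  set maxc := dups.foldl (fun m item => if m < item.2 then item.2 else m) 0 with hmaxc
  rw [PySem.List.foldl_append_eq_flatMap, pvRangeDesc]
  have hbucket : ∀ c : Int,
      (dups.foldl (fun b item => b.modify item.2 [] (fun l => l ++ [item]))
        PySem.Dict.empty).getD c [] = dups.filter (fun p => decide (p.2 = c)) := by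
    intro c
    rw [pvBucketGetD]
    simp
  rw [pvFlatMapCongr _ _ _ (fun c _ => hbucket c)]
  rw [pvSortBuckets ((List.range (maxc - 1).toNat).map (fun k : Nat => maxc - k)) dups
        (pvRangeDescPairwise maxc) ?_]
  · simp
  · intro p hp
    rw [pvMemRangeDesc]
    refine ⟨?_, pvMaxBound dups 0 p hp⟩
    have : 1 < p.2 := of_decide_eq_true (List.mem_filter.mp hp).2
    omega

theorem find_duplicate_topics_spec : Claim_equal_find_duplicate_topics := by
  intro topics _
  unfold Spec_find_duplicate_topics find_duplicate_topics find_duplicate_topics_alt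
  dsimp only
  -- the two counting folds are definitionally equal (Counter's modify is insert of getD + 1),
  -- so pvMain applies to both sides at once
  exact pvMain _
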